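-- pv_equiv track=rewrite | github.com/fpp-125/metaclaw-examples | examples/obsidian-terminal-bot-advanced/chat_tui.py | parse_value_and_default
-- ===== SOURCE A (Python) =====
-- def parse_value_and_default(tokens: list[str]) -> tuple[str | None, bool]:
--     args = list(tokens)
--     persist = False
--     out = []
--     for token in args:
--         if token == "--default":
--             persist = True
--         else:
--             out.append(token)
--     value = out[0] if out else None
--     return value, persist
-- ===== SOURCE B (Python) =====
-- def parse_value_and_default(tokens: list[str]) -> tuple[str | None, bool]:
--     # Back-to-front scan: walking the list in reverse and overwriting `value`
--     # at every non-flag token leaves the FIRST non-flag token in `value`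
--     # when the loop ends; no filtered list is ever built.
--     value = None
--     persist = False
--     for token in reversed(tokens):
--         if token == "--default":
--             persist = True
--         else:
--             value = token
--     return value, persist
-- ===== Notes on version B (the rewrite author's own statement) =====
-- stated objective: simpler
-- what changed: Replaces A's forward loop that materialises a filtered list and then takes its head with a single back-to-front scan that keeps only a scalar: traversing in reverse and overwriting value at each non-flag token leaves the first non-flag token, so no intermediate list exists.
import Mathlib
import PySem

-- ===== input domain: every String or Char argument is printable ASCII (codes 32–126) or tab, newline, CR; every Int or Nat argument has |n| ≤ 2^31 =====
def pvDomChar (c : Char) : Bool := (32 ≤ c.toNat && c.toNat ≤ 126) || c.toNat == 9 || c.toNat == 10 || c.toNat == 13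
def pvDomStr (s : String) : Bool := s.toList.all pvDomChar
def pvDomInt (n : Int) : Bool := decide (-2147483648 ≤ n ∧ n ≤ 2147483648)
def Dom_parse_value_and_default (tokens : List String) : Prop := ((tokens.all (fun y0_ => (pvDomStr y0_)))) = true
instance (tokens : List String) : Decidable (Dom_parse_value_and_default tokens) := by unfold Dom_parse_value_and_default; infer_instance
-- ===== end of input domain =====

-- B replaces A's forward loop (flag + materialised filtered list + head) with a single reverse scan
-- overwriting a scalar, so the first non-flag token survives; objective: simpler (O(1) extra space).

-- ===== PORT A =====
-- A: one forward loop carrying (persist, out); value is out's head.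
def parse_value_and_default (tokens : List String) : Option String × Bool :=
  let args := tokens
  let st := args.foldl (fun (acc : Bool × List String) token =>
      if token == "--default" then (true, acc.2) else (acc.1, acc.2 ++ [token]))
    (false, [])
  let value : Option String := match st.2 with
    | [] => none
    | v :: _ => some v
  (value, st.1)

-- ===== PORT B =====
-- B: loop over reversed(tokens) carrying (value, persist), overwriting value at non-flag tokens.
def parse_value_and_default_alt (tokens : List String) : Option String × Bool :=
  tokens.reverse.foldl (fun (acc : Option String × Bool) token =>
      if token == "--default" then (acc.1, true) else (some token, acc.2))
    (none, false)

-- ===== PRECONDITION & SPEC =====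
def Spec_parse_value_and_default (tokens : List String) (out : Option String × Bool) : Prop := out = parse_value_and_default_alt tokens
instance (tokens : List String) (out : Option String × Bool) : Decidable (Spec_parse_value_and_default tokens out) := by unfold Spec_parse_value_and_default; infer_instance

-- ===== CLAIM (what is proved, stated in full; the proofs are below) =====
def Claim_equal_parse_value_and_default : Prop := ∀ (tokens : List String), Dom_parse_value_and_default tokens → Spec_parse_value_and_default tokens (parse_value_and_default tokens)

-- ===== LEMMAS AND PROOFS =====

-- Invariant of A's loop: from (p, acc) it returns (p || contains, acc ++ filtered tokens).
theorem pv_fold_A (tokens : List String) : ∀ (p : Bool) (acc : List String),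
    tokens.foldl (fun (acc : Bool × List String) token =>
        if token == "--default" then (true, acc.2) else (acc.1, acc.2 ++ [token]))
      (p, acc)
    = (p || tokens.contains "--default", acc ++ tokens.filter (fun t => t ≠ "--default")) := by
  induction tokens with
  | nil => intro p acc; simp
  | cons h t ih =>
    intro p acc
    by_cases hh : h = "--default"
    · subst hh
      rw [List.foldl_cons, if_pos (by simp), ih true acc]
      simp [List.filter]
    · rw [List.foldl_cons, if_neg (by simp [hh]), ih p (acc ++ [h])]
      simp [List.filter, hh, Ne.symm hh]

-- B's reverse fold equals a foldr, which computes (first non-flag token, contains flag).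
theorem pv_fold_B (tokens : List String) :
    parse_value_and_default_alt tokens
    = (tokens.find? (fun t => t ≠ "--default"), tokens.contains "--default") := by
  unfold parse_value_and_default_alt
  rw [List.foldl_reverse]
  induction tokens with
  | nil => simp
  | cons h t ih =>
    simp only [List.foldr_cons, ih]
    by_cases hh : h = "--default"
    · subst hh; simp [List.find?]
    · simp [List.find?, hh, Ne.symm hh]

theorem pv_head_filter (tokens : List String) :
    (tokens.filter (fun t => t ≠ "--default")).head? = tokens.find? (fun t => t ≠ "--default") := by
  simp [List.head?_filter]

-- ===== VERDICT (by name: the statement is the Claim_ definition above) =====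
theorem parse_value_and_default_spec : Claim_equal_parse_value_and_default := by
  intro tokens _
  unfold Spec_parse_value_and_default parse_value_and_default
  rw [pv_fold_B]
  simp only [pv_fold_A tokens false [], Bool.false_or, List.nil_append]
  rw [← pv_head_filter tokens]
  cases (tokens.filter (fun t => t ≠ "--default")) <;> simp
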